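-- pv_equiv track=rewrite | github.com/Paranjayy/content-extractor | backend/app.py | _is_high_quality_image
-- ===== SOURCE A (Python) =====
-- def _is_high_quality_image(img_url):
--     """Check if an image URL indicates high quality"""
--     if not img_url:
--         return False
--
--     high_quality_indicators = [
--         'large', 'big', 'full', 'original', 'hd', 'high',
--         '1200', '1920', '2048', 'maxres', 'master'
--     ]
--
--     low_quality_indicators = [
--         'thumb', 'small', 'mini', 'icon', 'favicon',
--         '32x32', '16x16', '64x64', '128x128'
--     ]
--
--     url_lower = img_url.lower()
--
--     # Penalize low quality indicators
--     if any(indicator in url_lower for indicator in low_quality_indicators):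
--         return False
--
--     # Favor high quality indicators
--     if any(indicator in url_lower for indicator in high_quality_indicators):
--         return True
--
--     return True  # Default to true if no specific indicators
-- ===== SOURCE B (Python) =====
-- def _is_high_quality_image(img_url):
--     """Check if an image URL indicates high quality"""
--     if not img_url:
--         return False
--     low_quality_indicators = ('thumb', 'small', 'mini', 'icon', 'favicon',
--                               '32x32', '16x16', '64x64', '128x128')
--     u = img_url.lower()
--     # position-major scan: walk the URL once; at each position test whether
--     # any low-quality word starts there
--     for i in range(len(u)):
--         for ind in low_quality_indicators:
--             if u.startswith(ind, i):
--                 return False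
--     return True
-- ===== Notes on version B (the rewrite author's own statement) =====
-- stated objective: alternative
-- what changed: A does an indicator-major pass per list ('ind in url' for each of two lists, the high-quality one being dead code since both following branches return True); B drops the dead list and inverts the traversal into a single position-major walk over the URL, testing at each position whether any blacklist word starts there (naive multi-pattern matching).
import Mathlib
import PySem

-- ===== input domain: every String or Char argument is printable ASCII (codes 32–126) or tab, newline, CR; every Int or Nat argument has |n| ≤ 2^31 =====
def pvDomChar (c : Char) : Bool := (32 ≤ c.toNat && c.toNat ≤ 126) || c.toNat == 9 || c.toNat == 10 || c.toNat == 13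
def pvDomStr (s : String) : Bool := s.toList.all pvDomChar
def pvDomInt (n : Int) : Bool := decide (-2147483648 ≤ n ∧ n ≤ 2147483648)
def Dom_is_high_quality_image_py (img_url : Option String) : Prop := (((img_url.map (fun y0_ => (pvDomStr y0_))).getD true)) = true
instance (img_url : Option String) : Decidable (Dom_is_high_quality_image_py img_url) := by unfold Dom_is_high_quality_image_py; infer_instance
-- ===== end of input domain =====

-- B drops A's dead high-quality list and replaces A's per-indicator 'in' scans by one
-- position-major walk over the lowered URL (any blacklist word starting here?); alternative decomposition.
-- ===== PORT A =====
def is_high_quality_image_py (img_url : Option String) : Bool :=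
  match img_url with
  | none => false
  | some s =>
    if s = "" then false
    else
      let high_quality_indicators : List String :=
        ["large", "big", "full", "original", "hd", "high",
         "1200", "1920", "2048", "maxres", "master"]
      let low_quality_indicators : List String :=
        ["thumb", "small", "mini", "icon", "favicon",
         "32x32", "16x16", "64x64", "128x128"]
      let url_lower := PySem.Str.lower s
      if low_quality_indicators.any (fun ind => PySem.Str.isIn ind url_lower) then false
      else if high_quality_indicators.any (fun ind => PySem.Str.isIn ind url_lower) then true
      else true

-- ===== PORT B =====
-- B's 'for i in range(len(u)): for ind in …: if u.startswith(ind, i)' — the loop over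
-- start positions i is the structural recursion over the suffixes u.drop i.
def pvBadAt (bad : List (List Char)) : List Char → Bool
  | [] => false
  | c :: rest =>
      bad.any (fun ind => PySem.Chars.startswith (c :: rest) ind) || pvBadAt bad rest

def is_high_quality_image_py_alt (img_url : Option String) : Bool :=
  match img_url with
  | none => false
  | some s =>
    if s = "" then false
    else
      let low_quality_indicators : List (List Char) :=
        (["thumb", "small", "mini", "icon", "favicon",
          "32x32", "16x16", "64x64", "128x128"]).map String.toList
      !(pvBadAt low_quality_indicators (PySem.Str.lower s).toList)

-- ===== PRECONDITION & SPEC =====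
def Spec_is_high_quality_image_py (img_url : Option String) (out : Bool) : Prop := out = is_high_quality_image_py_alt img_url
instance (img_url : Option String) (out : Bool) : Decidable (Spec_is_high_quality_image_py img_url out) := by unfold Spec_is_high_quality_image_py; infer_instance

-- ===== CLAIM =====
def Claim_equal_is_high_quality_image_py : Prop := ∀ (img_url : Option String), Dom_is_high_quality_image_py img_url → Spec_is_high_quality_image_py img_url (is_high_quality_image_py img_url)

-- ===== LEMMAS AND PROOFS =====
-- The position-major scan finds a (nonempty) pattern iff it is an infix.
theorem pvBadAt_iff (bad : List (List Char)) (h : ∀ ind ∈ bad, ind ≠ []) :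
    ∀ l : List Char, pvBadAt bad l = true ↔ ∃ ind ∈ bad, ind <:+: l := by
  intro l
  induction l with
  | nil =>
    simp only [pvBadAt]
    constructor
    · intro hf; cases hf
    · rintro ⟨ind, hmem, hinf⟩
      exact absurd (List.eq_nil_of_infix_nil hinf) (h ind hmem)
  | cons c rest ih =>
    simp only [pvBadAt, Bool.or_eq_true, List.any_eq_true, ih]
    constructor
    · rintro (⟨ind, hmem, hsw⟩ | ⟨ind, hmem, hinf⟩)
      · exact ⟨ind, hmem, ((PySem.Chars.startswith_iff _ _).mp hsw).isInfix⟩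
      · exact ⟨ind, hmem, hinf.trans (List.suffix_cons c rest).isInfix⟩
    · rintro ⟨ind, hmem, hinf⟩
      rcases (List.infix_cons_iff).mp hinf with hpre | hinf'
      · exact Or.inl ⟨ind, hmem, (PySem.Chars.startswith_iff _ _).mpr hpre⟩
      · exact Or.inr ⟨ind, hmem, hinf'⟩

-- A's blacklist 'in'-scan agrees with B's position-major scan.
theorem pvKey (s : String) :
    ((["thumb", "small", "mini", "icon", "favicon",
       "32x32", "16x16", "64x64", "128x128"] : List String).any
      (fun ind => PySem.Str.isIn ind (PySem.Str.lower s)))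
    = pvBadAt ((["thumb", "small", "mini", "icon", "favicon",
       "32x32", "16x16", "64x64", "128x128"] : List String).map String.toList)
        (PySem.Str.lower s).toList := by
  rw [Bool.eq_iff_iff, List.any_eq_true, pvBadAt_iff _ (by decide)]
  constructor
  · rintro ⟨ind, hmem, hin⟩
    exact ⟨ind.toList, List.mem_map_of_mem hmem, (PySem.Str.isIn_iff_infix _ _).mp hin⟩
  · rintro ⟨ind, hmem, hinf⟩
    rcases List.mem_map.mp hmem with ⟨i0, h0, rfl⟩
    exact ⟨i0, h0, (PySem.Str.isIn_iff_infix _ _).mpr hinf⟩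

-- ===== VERDICT =====
theorem is_high_quality_image_py_spec : Claim_equal_is_high_quality_image_py := by
  intro img_url _
  unfold Spec_is_high_quality_image_py is_high_quality_image_py is_high_quality_image_py_alt
  cases img_url with
  | none => rfl
  | some s =>
    by_cases hs : s = ""
    · simp [hs]
    · simp only [if_neg hs]
      rw [pvKey s]
      cases h : pvBadAt ((["thumb", "small", "mini", "icon", "favicon",
          "32x32", "16x16", "64x64", "128x128"] : List String).map String.toList)
          (PySem.Str.lower s).toList
      · simp
      · simp
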